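-- pv_equiv track=rewrite | github.com/egoughnour/curate-ipsum | graph/kameda.py | _dfs_rank
-- ===== SOURCE A (Python) =====
-- def _dfs_rank(
--     ordered_forward: dict[str, list[str]],
--     all_ids: frozenset[str],
--     topo_order: list[str],
--     reverse_children: bool,
-- ) -> dict[str, int]:
--     """
--     Assign ranks via DFS using a specific child ordering.
--
--     Args:
--         ordered_forward: Successor lists ordered by embedding.
--         all_ids: All node IDs.
--         topo_order: Topological ordering (for finding roots).
--         reverse_children: If True, visit children in reverse embedding order.
--
--     Returns:
--         Dict mapping node_id to its DFS rank (visit order).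
--     """
--     # Find all root nodes (no predecessors in the DAG)
--     has_pred: set[str] = set()
--     for nid in all_ids:
--         for succ in ordered_forward.get(nid, []):
--             has_pred.add(succ)
--     roots = [nid for nid in topo_order if nid not in has_pred]
--
--     if not roots:
--         # Fallback: use topological order directly
--         return {nid: i for i, nid in enumerate(topo_order)}
--
--     visited: set[str] = set()
--     rank: dict[str, int] = {}
--     counter = [0]
--
--     def dfs(node: str) -> None:
--         if node in visited:
--             return
--         visited.add(node)
--         rank[node] = counter[0]
--         counter[0] += 1
--
--         children = ordered_forward.get(node, [])
--         if reverse_children: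
--             children = list(reversed(children))
--         for child in children:
--             dfs(child)
--
--     for root in roots:
--         dfs(root)
--
--     # Assign ranks to any unvisited nodes (isolated or unreachable)
--     for nid in topo_order:
--         if nid not in rank:
--             rank[nid] = counter[0]
--             counter[0] += 1
--
--     return rank
-- ===== SOURCE B (Python) =====
-- def _dfs_rank(
--     ordered_forward,
--     all_ids,
--     topo_order,
--     reverse_children,
-- ):
--     """Iterative re-implementation: explicit-stack preorder DFS building a
--     visit-order list, then one enumerate turns it into the rank dict."""
--     has_pred = set()
--     for nid in all_ids:
--         has_pred.update(ordered_forward.get(nid, []))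
--     roots = [nid for nid in topo_order if nid not in has_pred]
--
--     if not roots:
--         return {nid: i for i, nid in enumerate(topo_order)}
--
--     order = []
--     seen = set()
--     stack = list(reversed(roots))
--     while stack:
--         node = stack.pop()
--         if node in seen:
--             continue
--         seen.add(node)
--         order.append(node)
--         children = ordered_forward.get(node, [])
--         if reverse_children:
--             stack.extend(children)
--         else:
--             stack.extend(reversed(children))
--
--     for nid in topo_order:
--         if nid not in seen:
--             seen.add(nid)
--             order.append(nid)
--
--     return {nid: i for i, nid in enumerate(order)}
-- ===== Notes on version B (the rewrite author's own statement) =====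
-- stated objective: idiomatic
-- what changed: The recursive closure-based DFS mutating a rank dict and a counter cell is replaced by an explicit-stack preorder DFS (children pushed in reversed effective order) that collects the visit order in a list; the rank dict is produced at the end by one enumerate over that list.
import Mathlib
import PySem

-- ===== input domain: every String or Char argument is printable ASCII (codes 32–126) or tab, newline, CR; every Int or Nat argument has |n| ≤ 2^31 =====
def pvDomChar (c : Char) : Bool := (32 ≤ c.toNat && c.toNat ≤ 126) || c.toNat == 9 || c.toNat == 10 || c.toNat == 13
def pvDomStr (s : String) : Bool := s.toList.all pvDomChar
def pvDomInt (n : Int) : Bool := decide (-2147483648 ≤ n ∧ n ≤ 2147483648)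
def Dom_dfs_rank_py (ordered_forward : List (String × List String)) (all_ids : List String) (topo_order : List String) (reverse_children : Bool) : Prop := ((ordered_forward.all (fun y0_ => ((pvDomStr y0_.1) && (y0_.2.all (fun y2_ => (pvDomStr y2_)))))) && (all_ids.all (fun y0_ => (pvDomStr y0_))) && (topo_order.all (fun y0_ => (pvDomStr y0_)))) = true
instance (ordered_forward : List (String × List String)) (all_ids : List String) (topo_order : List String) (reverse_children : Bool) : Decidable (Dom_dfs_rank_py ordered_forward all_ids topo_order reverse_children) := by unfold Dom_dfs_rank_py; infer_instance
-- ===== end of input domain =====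

-- B replaces A's recursive closure-based DFS (rank dict + counter cell) by an explicit-stack
-- preorder DFS collecting the visit order in a list, ranked at the end by one enumerate (idiomatic).

-- ===== PORT A =====
-- DFS state of A: (visited, rank, counter).
abbrev pvStA := PySem.Set String × PySem.Dict String Int × Int

-- A's recursion terminates because `visited` only grows; Lean needs a syntactic measure, so a
-- fuel counter is threaded through the calls (one unit per call, returned unspent otherwise).
-- With the fuel dfs_rank_py supplies it never reaches 0, so every branch is exactly A's.
mutual
-- `def dfs(node)` of A; `pvDfsListA` is A's `for child in children: dfs(child)` loop.
def pvDfsA (fwd : PySem.Dict String (List String)) (rev : Bool) :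
    (g : Nat) → pvStA → String → {p : pvStA × Nat // p.2 ≤ g}
  | 0, st, _ => ⟨(st, 0), Nat.le_refl 0⟩
  | g+1, st, n =>
    if PySem.Set.contains st.1 n then ⟨(st, g), Nat.le_succ g⟩
    else
      let st' : pvStA := (PySem.Set.add st.1 n, st.2.1.insert n st.2.2, st.2.2 + 1)
      let ch := fwd.getD n []
      let r := pvDfsListA fwd rev g st' (if rev then ch.reverse else ch)
      ⟨r.val, Nat.le_trans r.property (Nat.le_succ g)⟩
  termination_by g => (g, 0)
  decreasing_by exact Prod.Lex.left _ _ (Nat.lt_succ_self g)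

def pvDfsListA (fwd : PySem.Dict String (List String)) (rev : Bool) :
    (g : Nat) → pvStA → List String → {p : pvStA × Nat // p.2 ≤ g}
  | g, st, [] => ⟨(st, g), Nat.le_refl g⟩
  | g, st, n :: rest =>
    match pvDfsA fwd rev g st n with
    | ⟨(st', g'), h⟩ =>
      let r2 := pvDfsListA fwd rev g' st' rest
      ⟨r2.val, Nat.le_trans r2.property h⟩
  termination_by g _ l => (g, l.length + 1)
  decreasing_by
  all_goals first
    | exact Prod.Lex.right _ (by omega)
    | (rcases Nat.lt_or_eq_of_le h with h' | h'
       · exact Prod.Lex.left _ _ h'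
       · subst h'; exact Prod.Lex.right _ (by simp [List.length_cons]))
end

def dfs_rank_py (ordered_forward : List (String × List String)) (all_ids : List String) (topo_order : List String) (reverse_children : Bool) : List (String × Int) :=
  let fwd := PySem.Dict.mk ordered_forward
  -- has_pred: set(); for nid in all_ids: for succ in ordered_forward.get(nid, []): has_pred.add(succ)
  let has_pred := all_ids.foldl (fun s nid => (fwd.getD nid []).foldl PySem.Set.add s) PySem.Set.empty
  let roots := topo_order.filter (fun nid => !(PySem.Set.contains has_pred nid))
  if roots.isEmpty then
    -- {nid: i for i, nid in enumerate(topo_order)}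
    (topo_order.zipIdx.foldl (fun d p => d.insert p.1 (p.2 : Int)) PySem.Dict.empty).items
  else
    -- enough fuel for every call the Python recursion makes (one call per root plus at most
    -- one call per successor-list entry of a visited node)
    let fuel := topo_order.length + (ordered_forward.foldl (fun a p => a + p.2.length) 0) + 1
    -- for root in roots: dfs(root)
    let st := (pvDfsListA fwd reverse_children fuel (PySem.Set.empty, PySem.Dict.empty, 0) roots).val.1
    -- for nid in topo_order: if nid not in rank: rank[nid] = counter[0]; counter[0] += 1
    (topo_order.foldl (fun (st : pvStA) nid =>
        if !(st.2.1.contains nid) then (st.1, st.2.1.insert nid st.2.2, st.2.2 + 1) else st) st).2.1.items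

-- ===== PORT B =====
-- {nid: i for i, nid in enumerate(order)}
def pvRankOf (ord : List String) : PySem.Dict String Int :=
  ord.zipIdx.foldl (fun d p => d.insert p.1 (p.2 : Int)) PySem.Dict.empty

-- B's while-loop over the explicit stack; state (seen, order). The HEAD of the list is the top
-- of Python's stack (Python pops from the end), so `stack.extend(<reversed effective children>)`
-- becomes prepending the effective children. Fuel: one unit per pop, as a totality guard.
def pvLoopB (fwd : PySem.Dict String (List String)) (rev : Bool) :
    Nat → PySem.Set String × List String → List String → PySem.Set String × List String
  | 0, p, _ => p
  | _+1, p, [] => p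
  | g+1, p, n :: stack =>
    if PySem.Set.contains p.1 n then pvLoopB fwd rev g p stack
    else
      let ch := fwd.getD n []
      pvLoopB fwd rev g (PySem.Set.add p.1 n, p.2 ++ [n]) ((if rev then ch.reverse else ch) ++ stack)

def dfs_rank_py_alt (ordered_forward : List (String × List String)) (all_ids : List String) (topo_order : List String) (reverse_children : Bool) : List (String × Int) :=
  let fwd := PySem.Dict.mk ordered_forward
  -- has_pred.update(ordered_forward.get(nid, []))
  let has_pred := all_ids.foldl (fun s nid => PySem.Set.update s (fwd.getD nid [])) PySem.Set.empty
  let roots := topo_order.filter (fun nid => !(PySem.Set.contains has_pred nid))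
  if roots.isEmpty then (pvRankOf topo_order).items
  else
    let fuel := topo_order.length + (ordered_forward.foldl (fun a p => a + p.2.length) 0) + 1
    -- stack = list(reversed(roots)): head-first that is just `roots`
    let p := pvLoopB fwd reverse_children fuel (PySem.Set.empty, []) roots
    -- for nid in topo_order: if nid not in seen: seen.add(nid); order.append(nid)
    let p2 := topo_order.foldl (fun (p : PySem.Set String × List String) nid =>
        if !(PySem.Set.contains p.1 nid) then (PySem.Set.add p.1 nid, p.2 ++ [nid]) else p) p
    (pvRankOf p2.2).items

-- ===== PRECONDITION & SPEC =====
def Spec_dfs_rank_py (ordered_forward : List (String × List String)) (all_ids : List String) (topo_order : List String) (reverse_children : Bool) (out : List (String × Int)) : Prop := out = dfs_rank_py_alt ordered_forward all_ids topo_order reverse_children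
instance (ordered_forward : List (String × List String)) (all_ids : List String) (topo_order : List String) (reverse_children : Bool) (out : List (String × Int)) : Decidable (Spec_dfs_rank_py ordered_forward all_ids topo_order reverse_children out) := by unfold Spec_dfs_rank_py; infer_instance

-- ===== CLAIM (what is proved, stated in full; the proofs are below) =====
def Claim_equal_dfs_rank_py : Prop := ∀ (ordered_forward : List (String × List String)) (all_ids : List String) (topo_order : List String) (reverse_children : Bool), Dom_dfs_rank_py ordered_forward all_ids topo_order reverse_children → Spec_dfs_rank_py ordered_forward all_ids topo_order reverse_children (dfs_rank_py ordered_forward all_ids topo_order reverse_children)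

-- ===== LEMMAS AND PROOFS =====

-- B-state seen as an A-state
def pvStOf (p : PySem.Set String × List String) : pvStA := (p.1, pvRankOf p.2, (p.2.length : Int))

theorem pvRankOf_append (ord : List String) (n : String) :
    pvRankOf (ord ++ [n]) = (pvRankOf ord).insert n (ord.length : Int) := by
  unfold pvRankOf
  rw [List.zipIdx_append, List.foldl_append]
  simp

theorem pvContains_rankOf (ord : List String) (x : String) :
    (pvRankOf ord).contains x = true ↔ x ∈ ord := by
  rw [PySem.Dict.contains_iff_mem_keys]
  unfold pvRankOf
  rw [PySem.Dict.keys_foldl_insert_key (key := Prod.fst) (f := fun d (p : String × Nat) => ((p.2 : Int)))]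
  rw [List.zipIdx_map_fst]
  simp [PySem.Set.mem_update, PySem.Dict.keys_empty]

theorem pvDfsListA_nil (fwd : PySem.Dict String (List String)) (rev : Bool)
    (g : Nat) (st : pvStA) : (pvDfsListA fwd rev g st []).val = (st, g) := by
  rw [pvDfsListA]

theorem pvDfsListA_cons (fwd : PySem.Dict String (List String)) (rev : Bool)
    (g : Nat) (st : pvStA) (n : String) (rest : List String) :
    (pvDfsListA fwd rev g st (n :: rest)).val =
      (pvDfsListA fwd rev (pvDfsA fwd rev g st n).val.2 (pvDfsA fwd rev g st n).val.1 rest).val := by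
  rw [pvDfsListA]

theorem pvDfsA_visited (fwd : PySem.Dict String (List String)) (rev : Bool)
    (g : Nat) (st : pvStA) (n : String) (h : PySem.Set.contains st.1 n = true) :
    (pvDfsA fwd rev (g+1) st n).val = (st, g) := by
  rw [pvDfsA]
  simp [(PySem.Set.contains_iff st.1 n).mp h]

theorem pvDfsA_unvisited (fwd : PySem.Dict String (List String)) (rev : Bool)
    (g : Nat) (st : pvStA) (n : String) (h : PySem.Set.contains st.1 n = false) :
    (pvDfsA fwd rev (g+1) st n).val =
      (pvDfsListA fwd rev g (PySem.Set.add st.1 n, st.2.1.insert n st.2.2, st.2.2 + 1)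
        (if rev then (fwd.getD n []).reverse else fwd.getD n [])).val := by
  have h' : ¬ n ∈ st.1 := by simpa using h
  rw [pvDfsA]
  simp [h']

theorem pvDfsA_zero (fwd : PySem.Dict String (List String)) (rev : Bool) (st : pvStA) (n : String) :
    (pvDfsA fwd rev 0 st n).val = (st, 0) := by
  rw [pvDfsA]

theorem pvDfsListA_zero (fwd : PySem.Dict String (List String)) (rev : Bool) :
    ∀ (l : List String) (st : pvStA), (pvDfsListA fwd rev 0 st l).val = (st, 0) := by
  intro l
  induction l with
  | nil => intro st; simp [pvDfsListA]
  | cons n rest ih =>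
    intro st
    rw [pvDfsListA_cons, pvDfsA_zero]
    exact ih st

theorem pvDfsListA_append (fwd : PySem.Dict String (List String)) (rev : Bool) :
    ∀ (l1 : List String) (g : Nat) (st : pvStA) (l2 : List String),
      (pvDfsListA fwd rev g st (l1 ++ l2)).val =
        (pvDfsListA fwd rev (pvDfsListA fwd rev g st l1).val.2 (pvDfsListA fwd rev g st l1).val.1 l2).val := by
  intro l1
  induction l1 with
  | nil => intro g st l2; rw [List.nil_append, pvDfsListA_nil]
  | cons n l1 ih =>
    intro g st l2
    rw [List.cons_append, pvDfsListA_cons, pvDfsListA_cons]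
    exact ih _ _ _

theorem pvLoop_sim (fwd : PySem.Dict String (List String)) (rev : Bool) :
    ∀ (g : Nat) (p : PySem.Set String × List String) (stack : List String),
      pvStOf (pvLoopB fwd rev g p stack) = (pvDfsListA fwd rev g (pvStOf p) stack).val.1 := by
  intro g
  induction g with
  | zero =>
    intro p stack
    rw [pvDfsListA_zero]
    rfl
  | succ g ih =>
    intro p stack
    cases stack with
    | nil => simp [pvLoopB, pvDfsListA]
    | cons n rest =>
      rw [pvDfsListA_cons]
      cases hc : PySem.Set.contains p.1 n with
      | true =>
        rw [pvDfsA_visited fwd rev g (pvStOf p) n hc]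
        show pvStOf (pvLoopB fwd rev (g+1) p (n :: rest)) = (pvDfsListA fwd rev g (pvStOf p) rest).val.1
        rw [pvLoopB]
        simp only [hc, if_true]
        exact ih p rest
      | false =>
        rw [pvDfsA_unvisited fwd rev g (pvStOf p) n hc]
        rw [← pvDfsListA_append]
        have hst : ((pvStOf p).1.add n, (pvStOf p).2.1.insert n (pvStOf p).2.2, (pvStOf p).2.2 + 1) =
            pvStOf (PySem.Set.add p.1 n, p.2 ++ [n]) := by
          show (PySem.Set.add p.1 n, (pvRankOf p.2).insert n (p.2.length : Int), (p.2.length : Int) + 1) = _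
          unfold pvStOf
          rw [← pvRankOf_append]
          simp [List.length_append]
        rw [hst]
        show pvStOf (pvLoopB fwd rev (g+1) p (n :: rest)) = _
        rw [pvLoopB]
        simp only [hc, Bool.false_eq_true, if_false]
        exact ih (PySem.Set.add p.1 n, p.2 ++ [n]) ((if rev = true then (fwd.getD n []).reverse else fwd.getD n []) ++ rest)

theorem pvLoopB_inv (fwd : PySem.Dict String (List String)) (rev : Bool) :
    ∀ (g : Nat) (p : PySem.Set String × List String) (stack : List String),
      (∀ x, x ∈ p.1 ↔ x ∈ p.2) →
      ∀ x, x ∈ (pvLoopB fwd rev g p stack).1 ↔ x ∈ (pvLoopB fwd rev g p stack).2 := by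
  intro g
  induction g with
  | zero => intro p stack hp; simpa [pvLoopB] using hp
  | succ g ih =>
    intro p stack hp
    cases stack with
    | nil => simpa [pvLoopB] using hp
    | cons n rest =>
      rw [pvLoopB]
      cases hc : PySem.Set.contains p.1 n with
      | true =>
        simp only [if_true]
        exact ih p rest hp
      | false =>
        simp only [Bool.false_eq_true, if_false]
        refine ih _ _ ?_
        intro x
        simp only [PySem.Set.mem_add, List.mem_append, List.mem_singleton]
        exact or_congr_left (hp x)

theorem pvFinal_sim :
    ∀ (topo : List String) (p : PySem.Set String × List String) (v : PySem.Set String),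
      (∀ x, x ∈ p.1 ↔ x ∈ p.2) →
      (topo.foldl (fun (st : pvStA) nid =>
          if !(st.2.1.contains nid) then (st.1, st.2.1.insert nid st.2.2, st.2.2 + 1) else st)
        (v, pvRankOf p.2, (p.2.length : Int))).2.1 =
      pvRankOf (topo.foldl (fun (p : PySem.Set String × List String) nid =>
          if !(PySem.Set.contains p.1 nid) then (PySem.Set.add p.1 nid, p.2 ++ [nid]) else p) p).2 := by
  intro topo
  induction topo with
  | nil => intro p v hp; rfl
  | cons nid topo ih =>
    intro p v hp
    have hbeq : (pvRankOf p.2).contains nid = PySem.Set.contains p.1 nid := by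
      rw [Bool.eq_iff_iff, pvContains_rankOf, PySem.Set.contains_iff]
      exact (hp nid).symm
    simp only [List.foldl_cons, hbeq]
    cases hc : PySem.Set.contains p.1 nid with
    | true => simp only [Bool.not_true, Bool.false_eq_true, if_false]; exact ih p v hp
    | false =>
      simp only [Bool.not_false, if_true]
      have h1 : ((v, (pvRankOf p.2).insert nid (p.2.length : Int), (p.2.length : Int) + 1) : pvStA) =
          (v, pvRankOf (p.2 ++ [nid]), ((p.2 ++ [nid]).length : Int)) := by
        rw [← pvRankOf_append]
        simp [List.length_append]
      rw [h1]
      refine ih (PySem.Set.add p.1 nid, p.2 ++ [nid]) v ?_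
      intro x
      simp only [PySem.Set.mem_add, List.mem_append, List.mem_singleton]
      exact or_congr_left (hp x)

theorem pvCore (fwd : PySem.Dict String (List String)) (rev : Bool) (fuel : Nat)
    (topo roots : List String) :
    (topo.foldl (fun (st : pvStA) nid =>
        if !(st.2.1.contains nid) then (st.1, st.2.1.insert nid st.2.2, st.2.2 + 1) else st)
      ((pvDfsListA fwd rev fuel (PySem.Set.empty, PySem.Dict.empty, 0) roots).val.1)).2.1.items =
    (pvRankOf (topo.foldl (fun (p : PySem.Set String × List String) nid =>
        if !(PySem.Set.contains p.1 nid) then (PySem.Set.add p.1 nid, p.2 ++ [nid]) else p)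
      (pvLoopB fwd rev fuel (PySem.Set.empty, []) roots)).2).items := by
  have hsim := pvLoop_sim fwd rev fuel (PySem.Set.empty, []) roots
  have h0 : pvStOf (PySem.Set.empty, ([] : List String)) = (PySem.Set.empty, PySem.Dict.empty, 0) := rfl
  rw [h0] at hsim
  rw [← hsim]
  have hinv := pvLoopB_inv fwd rev fuel (PySem.Set.empty, []) roots (fun x => Iff.rfl)
  have hfin := pvFinal_sim topo (pvLoopB fwd rev fuel (PySem.Set.empty, []) roots)
      (pvLoopB fwd rev fuel (PySem.Set.empty, []) roots).1 hinv
  rw [show pvStOf (pvLoopB fwd rev fuel (PySem.Set.empty, []) roots) =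
      ((pvLoopB fwd rev fuel (PySem.Set.empty, []) roots).1,
        pvRankOf (pvLoopB fwd rev fuel (PySem.Set.empty, []) roots).2,
        ((pvLoopB fwd rev fuel (PySem.Set.empty, []) roots).2.length : Int)) from rfl]
  rw [hfin]

-- ===== VERDICT (by name: the statement is the Claim_ definition above) =====
theorem dfs_rank_py_spec : Claim_equal_dfs_rank_py := by
  intro ofw all_ids topo rev _
  unfold Spec_dfs_rank_py dfs_rank_py dfs_rank_py_alt
  have hupd : ∀ (xs : List String) (s : PySem.Set String),
      PySem.Set.update s xs = xs.foldl PySem.Set.add s := by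
    intro xs
    induction xs with
    | nil => intro s; rw [PySem.Set.update_nil]; rfl
    | cons y ys ih => intro s; rw [PySem.Set.update_cons, List.foldl_cons]; exact ih _
  simp only [hupd]
  cases hroots : (topo.filter (fun nid => !(PySem.Set.contains
      (all_ids.foldl (fun s nid => ((PySem.Dict.mk ofw).getD nid []).foldl PySem.Set.add s)
        PySem.Set.empty) nid))).isEmpty with
  | true => simp only [if_true]; rfl
  | false => simp only [Bool.false_eq_true, if_false]; exact pvCore _ _ _ _ _
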